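-- pv_equiv track=rewrite | github.com/lizzy-0323/VF-FD | src/model/overlapping_selection.py | choose_columns_by_score
-- ===== SOURCE A (Python) =====
-- def choose_columns_by_score(score_list):
--     """
--     calculate overlapping choices
--     :param score_list: list contains each silo's score in overlapping columns
--     :return: overlapping selection dict
--     """
--     id_dict = {}
--     for i, silo in enumerate(score_list):
--         client_id = i + 1
--         for key, value in silo.items():
--             current_info = id_dict.get(key, {"score": 0, "id": client_id})
--             if value > current_info["score"]:
--                 id_dict[key] = {"score": value, "id": client_id}
--     # 生成各个silo中的overlapping列的选择结果
--     return {key: value["id"] for key, value in id_dict.items()}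
-- ===== SOURCE B (Python) =====
-- def choose_columns_by_score(score_list):
--     # Pass 1: group all strictly-positive (client_id, value) candidates per key,
--     # in silo order (so dict key order = order of first positive occurrence,
--     # matching A's insertion order).
--     candidates = {}
--     for i, silo in enumerate(score_list):
--         client_id = i + 1
--         for key, value in silo.items():
--             if value > 0:
--                 candidates.setdefault(key, []).append((client_id, value))
--     # Pass 2: per key, the first maximal entry wins (earliest client id on ties).
--     return {key: max(entries, key=lambda t: t[1])[0]
--             for key, entries in candidates.items()}
-- ===== Notes on version B (the rewrite author's own statement) =====
-- stated objective: alternative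
-- what changed: Replaces A's single running best-so-far dict of {'score','id'} records by a two-pass decomposition: first group all strictly-positive (client_id, value) candidates per key in silo order, then pick each key's first maximal entry with max(..., key=lambda t: t[1]).
import Mathlib
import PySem

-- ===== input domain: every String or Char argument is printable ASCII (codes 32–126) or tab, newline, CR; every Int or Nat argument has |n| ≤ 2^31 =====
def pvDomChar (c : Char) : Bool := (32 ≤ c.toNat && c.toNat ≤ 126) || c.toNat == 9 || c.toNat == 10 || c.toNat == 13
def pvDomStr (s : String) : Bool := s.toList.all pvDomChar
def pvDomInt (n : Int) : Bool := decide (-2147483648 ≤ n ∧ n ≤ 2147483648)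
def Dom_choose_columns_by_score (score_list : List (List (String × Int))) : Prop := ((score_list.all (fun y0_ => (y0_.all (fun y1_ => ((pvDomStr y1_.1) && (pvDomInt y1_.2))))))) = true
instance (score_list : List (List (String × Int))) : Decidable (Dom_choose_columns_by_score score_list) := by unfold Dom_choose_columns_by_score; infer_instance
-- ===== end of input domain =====

-- B: two-pass decomposition — first group all strictly-positive (client_id, value)
-- candidates per key, then pick each key's first maximal entry; same cost, different structure.


-- ===== PORT A =====
-- id_dict values {"score": v, "id": c} are modelled as the pair (score, id).
def choose_columns_by_score (score_list : List (List (String × Int))) : List (String × Int) :=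
  let id_dict : PySem.Dict String (Int × Int) :=
    (PySem.List.enumerate score_list).foldl
      (fun d p =>
        let client_id := p.1 + 1
        p.2.foldl
          (fun d kv =>
            let current_info := d.getD kv.1 (0, client_id)
            if kv.2 > current_info.1 then d.insert kv.1 (kv.2, client_id) else d)
          d)
      PySem.Dict.empty
  id_dict.items.map (fun p => (p.1, p.2.2))

-- ===== PORT B =====
-- max(entries, key=lambda t: t[1]) : first maximal by second component.
def pyMaxBySnd (e : Int × Int) (rest : List (Int × Int)) : Int × Int :=
  rest.foldl (fun best t => if t.2 > best.2 then t else best) e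

-- candidates.setdefault(key, []).append(t) ported as insert of (getD ++ [t]).
def choose_columns_by_score_alt (score_list : List (List (String × Int))) : List (String × Int) :=
  let candidates : PySem.Dict String (List (Int × Int)) :=
    (PySem.List.enumerate score_list).foldl
      (fun c p =>
        let client_id := p.1 + 1
        p.2.foldl
          (fun c kv =>
            if kv.2 > 0 then c.insert kv.1 (c.getD kv.1 [] ++ [(client_id, kv.2)]) else c)
          c)
      PySem.Dict.empty
  candidates.items.map (fun p =>
    (p.1, match p.2 with
          | [] => 0
          | e :: rest => (pyMaxBySnd e rest).1))

-- ===== PRECONDITION & SPEC =====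
def Spec_choose_columns_by_score (score_list : List (List (String × Int))) (out : List (String × Int)) : Prop := out = choose_columns_by_score_alt score_list
instance (score_list : List (List (String × Int))) (out : List (String × Int)) : Decidable (Spec_choose_columns_by_score score_list out) := by unfold Spec_choose_columns_by_score; infer_instance

-- ===== CLAIM (what is proved, stated in full; the proofs are below) =====
def Claim_equal_choose_columns_by_score : Prop := ∀ (score_list : List (List (String × Int))), Dom_choose_columns_by_score score_list → Spec_choose_columns_by_score score_list (choose_columns_by_score score_list)

-- ===== LEMMAS AND PROOFS =====

-- proof-side flattened occurrence list and step functions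
def pvStepA (d : PySem.Dict String (Int × Int)) (o : Int × String × Int) : PySem.Dict String (Int × Int) :=
  let current_info := d.getD o.2.1 (0, o.1)
  if o.2.2 > current_info.1 then d.insert o.2.1 (o.2.2, o.1) else d

def pvStepB (c : PySem.Dict String (List (Int × Int))) (o : Int × String × Int) : PySem.Dict String (List (Int × Int)) :=
  if o.2.2 > 0 then c.insert o.2.1 (c.getD o.2.1 [] ++ [(o.1, o.2.2)]) else c

def pvOccs (score_list : List (List (String × Int))) : List (Int × String × Int) :=
  (PySem.List.enumerate score_list).flatMap (fun p => p.2.map (fun kv => (p.1 + 1, kv.1, kv.2)))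

def pvBest (es : List (Int × Int)) : Int × Int :=
  match es with
  | [] => (0, 0)
  | e :: r => ((pyMaxBySnd e r).2, (pyMaxBySnd e r).1)

def pvInv (d : PySem.Dict String (Int × Int)) (c : PySem.Dict String (List (Int × Int))) : Prop :=
  d.items = c.items.map (fun p => (p.1, pvBest p.2)) ∧
  c.keys.Nodup ∧
  ∀ p ∈ c.items, p.2 ≠ [] ∧ ∀ e ∈ p.2, 0 < e.2

lemma pvMaxBySnd_mem (e : Int × Int) (r : List (Int × Int)) : pyMaxBySnd e r ∈ e :: r := by
  induction r generalizing e with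
  | nil => simp [pyMaxBySnd]
  | cons t r ih =>
    have hstep : pyMaxBySnd e (t :: r) = pyMaxBySnd (if t.2 > e.2 then t else e) r := rfl
    rw [hstep]
    rcases List.mem_cons.mp (ih (if t.2 > e.2 then t else e)) with h | h
    · rw [h]; split_ifs <;> simp
    · simp [h]

lemma pvMaxBySnd_append (e : Int × Int) (r : List (Int × Int)) (t : Int × Int) :
    pyMaxBySnd e (r ++ [t]) = if t.2 > (pyMaxBySnd e r).2 then t else pyMaxBySnd e r := by
  simp [pyMaxBySnd, List.foldl_append]

lemma pvBest_append (es : List (Int × Int)) (t : Int × Int) (h : es ≠ []) :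
    pvBest (es ++ [t]) = if t.2 > (pvBest es).1 then (t.2, t.1) else pvBest es := by
  match es with
  | e :: r =>
    simp only [pvBest, List.cons_append, pvMaxBySnd_append]
    split_ifs <;> simp

lemma pvBest_pos (es : List (Int × Int)) (h : es ≠ []) (hp : ∀ e ∈ es, 0 < e.2) :
    0 < (pvBest es).1 := by
  match es with
  | e :: r =>
    simpa [pvBest] using hp _ (pvMaxBySnd_mem e r)

lemma pvInv_keys {d : PySem.Dict String (Int × Int)} {c : PySem.Dict String (List (Int × Int))}
    (h : pvInv d c) : d.keys = c.keys := by
  simp only [PySem.Dict.keys, h.1, List.map_map]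
  rfl

lemma pvInv_step (d : PySem.Dict String (Int × Int)) (c : PySem.Dict String (List (Int × Int)))
    (o : Int × String × Int) (h : pvInv d c) : pvInv (pvStepA d o) (pvStepB c o) := by
  obtain ⟨hI, hN, hP⟩ := h
  obtain ⟨cid, k, v⟩ := o
  have hkeys : d.keys = c.keys := pvInv_keys ⟨hI, hN, hP⟩
  have hdN : d.keys.Nodup := hkeys ▸ hN
  have hAdef : pvStepA d (cid, k, v)
      = (if v > (d.getD k (0, cid)).1 then d.insert k (v, cid) else d) := rfl
  have hBdef : pvStepB c (cid, k, v)
      = (if v > 0 then c.insert k (c.getD k [] ++ [(cid, v)]) else c) := rfl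
  by_cases hc : c.contains k = true
  · -- key present: pick its entry
    have hkmem : k ∈ c.keys := (PySem.Dict.contains_iff_mem_keys _ _).mp hc
    obtain ⟨es, hpmem⟩ : ∃ es, (k, es) ∈ c.items := by
      simp only [PySem.Dict.keys, List.mem_map] at hkmem
      obtain ⟨p, hp, hpk⟩ := hkmem
      exact ⟨p.2, by rw [← hpk]; simpa using hp⟩
    have hdmem : (k, pvBest es) ∈ d.items := by
      rw [hI]; exact List.mem_map_of_mem hpmem
    have hdget : d.getD k (0, cid) = pvBest es := PySem.Dict.getD_of_mem_items _ hdmem hdN _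
    have hcget : c.getD k [] = es := PySem.Dict.getD_of_mem_items _ hpmem hN _
    have hdc : d.contains k = true := by
      rw [PySem.Dict.contains_eq_decide_mem_keys, hkeys]; simpa using hkmem
    have hes := hP _ hpmem
    have hesne : es ≠ [] := hes.1
    have hespos : ∀ e ∈ es, 0 < e.2 := hes.2
    have hbpos : 0 < (pvBest es).1 := pvBest_pos es hesne hespos
    have huniq : ∀ q ∈ c.items, q.1 = k → q = (k, es) := by
      intro q hq hqk
      have h1 := PySem.Dict.get?_of_mem_items _ hpmem hN
      have h2 := PySem.Dict.get?_of_mem_items _ hq hN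
      rw [hqk, h1] at h2
      have h3 : q.2 = es := by injection h2 with h4; exact h4.symm
      calc q = (q.1, q.2) := rfl
        _ = (k, es) := by rw [hqk, h3]
    by_cases hv : v > 0
    · -- B appends (cid, v) to the entry of k
      have hBitems : (pvStepB c (cid, k, v)).items
          = c.items.map (fun q => if q.1 == k then (k, es ++ [(cid, v)]) else q) := by
        rw [hBdef, if_pos hv, hcget, PySem.Dict.items_insert_of_contains _ _ hc]
      have hBkeys : (pvStepB c (cid, k, v)).keys = c.keys := by
        simp only [PySem.Dict.keys, hBitems, List.map_map]
        apply List.map_congr_left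
        intro q hq
        by_cases hqk : q.1 = k <;> simp [hqk]
      have hBpos : ∀ q ∈ (pvStepB c (cid, k, v)).items, q.2 ≠ [] ∧ ∀ e ∈ q.2, 0 < e.2 := by
        intro q hq
        rw [hBitems] at hq
        obtain ⟨q', hq', hqe⟩ := List.mem_map.mp hq
        by_cases hqk : q'.1 = k
        · have := huniq q' hq' hqk
          subst this
          simp only [BEq.rfl, if_pos] at hqe
          subst hqe
          refine ⟨by simp, ?_⟩
          intro e he
          rcases List.mem_append.mp he with h1 | h1
          · exact hespos e h1
          · simp only [List.mem_singleton] at h1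
            subst h1
            simpa using hv
        · simp only [beq_iff_eq, hqk, ite_false] at hqe
          subst hqe
          exact hP q' hq'
      by_cases hgt : v > (pvBest es).1
      · have hAitems : (pvStepA d (cid, k, v)).items
            = d.items.map (fun q => if q.1 == k then (k, (v, cid)) else q) := by
          rw [hAdef, hdget, if_pos hgt, PySem.Dict.items_insert_of_contains _ _ hdc]
        refine ⟨?_, hBkeys ▸ hN, hBpos⟩
        rw [hAitems, hBitems, hI, List.map_map, List.map_map]
        apply List.map_congr_left
        intro q hq
        by_cases hqk : q.1 = k
        · have := huniq q hq hqk
          subst this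
          simp [pvBest_append es (cid, v) hesne, hgt]
        · simp [hqk]
      · -- A unchanged; B's appended entry keeps the same best
        have hAit : pvStepA d (cid, k, v) = d := by
          rw [hAdef, hdget, if_neg hgt]
        refine ⟨?_, hBkeys ▸ hN, hBpos⟩
        rw [hAit, hBitems, hI, List.map_map]
        apply List.map_congr_left
        intro q hq
        by_cases hqk : q.1 = k
        · have := huniq q hq hqk
          subst this
          simp [pvBest_append es (cid, v) hesne, hgt]
        · simp [hqk]
    · -- v ≤ 0: both unchanged
      have hA : pvStepA d (cid, k, v) = d := by
        rw [hAdef, hdget, if_neg (by omega)]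
      have hB : pvStepB c (cid, k, v) = c := by
        rw [hBdef, if_neg hv]
      rw [hA, hB]; exact ⟨hI, hN, hP⟩
  · -- key absent from both
    have hc' : c.contains k = false := by simpa using hc
    have hdc : d.contains k = false := by
      rw [PySem.Dict.contains_eq_decide_mem_keys, hkeys,
        ← PySem.Dict.contains_eq_decide_mem_keys]
      exact hc'
    have hdget : d.getD k (0, cid) = (0, cid) := PySem.Dict.getD_of_not_contains _ _ hdc
    have hcget : c.getD k [] = [] := PySem.Dict.getD_of_not_contains _ _ hc'
    by_cases hv : v > 0
    · have hAitems : (pvStepA d (cid, k, v)).items = d.items ++ [(k, (v, cid))] := by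
        rw [hAdef, hdget, if_pos hv, PySem.Dict.items_insert_of_not_contains _ _ hdc]
      have hBitems : (pvStepB c (cid, k, v)).items = c.items ++ [(k, [(cid, v)])] := by
        rw [hBdef, if_pos hv, hcget, List.nil_append,
          PySem.Dict.items_insert_of_not_contains _ _ hc']
      refine ⟨?_, ?_, ?_⟩
      · rw [hAitems, hBitems, hI, List.map_append]
        simp [pvBest, pyMaxBySnd]
      · have : (pvStepB c (cid, k, v)).keys = c.keys ++ [k] := by
          simp [PySem.Dict.keys, hBitems]
        rw [this]
        refine List.Nodup.append hN (by simp) ?_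
        intro a ha hb
        simp only [List.mem_singleton] at hb
        subst hb
        have hnk : a ∉ c.keys := by
          simpa [PySem.Dict.contains_eq_decide_mem_keys] using hc'
        exact hnk ha
      · intro q hq
        rw [hBitems] at hq
        rcases List.mem_append.mp hq with h1 | h1
        · exact hP q h1
        · simp only [List.mem_singleton] at h1
          subst h1
          refine ⟨by simp, ?_⟩
          intro e he
          simp only [List.mem_singleton] at he
          subst he
          simpa using hv
    · have hA : pvStepA d (cid, k, v) = d := by
        rw [hAdef, hdget]
        exact if_neg (by simpa using hv)
      have hB : pvStepB c (cid, k, v) = c := by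
        rw [hBdef, if_neg hv]
      rw [hA, hB]; exact ⟨hI, hN, hP⟩

lemma pvInv_foldl (os : List (Int × String × Int)) :
    ∀ d c, pvInv d c → pvInv (os.foldl pvStepA d) (os.foldl pvStepB c) := by
  induction os with
  | nil => intro d c h; exact h
  | cons o os ih =>
    intro d c h
    exact ih _ _ (pvInv_step d c o h)

lemma pvA_eq_foldl (score_list : List (List (String × Int))) :
    choose_columns_by_score score_list
      = ((pvOccs score_list).foldl pvStepA PySem.Dict.empty).items.map (fun p => (p.1, p.2.2)) := by
  simp only [choose_columns_by_score, pvOccs, List.foldl_flatMap, List.foldl_map]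
  rfl

lemma pvB_eq_foldl (score_list : List (List (String × Int))) :
    choose_columns_by_score_alt score_list
      = ((pvOccs score_list).foldl pvStepB PySem.Dict.empty).items.map (fun p =>
          (p.1, match p.2 with
                | [] => 0
                | e :: rest => (pyMaxBySnd e rest).1)) := by
  simp only [choose_columns_by_score_alt, pvOccs, List.foldl_flatMap, List.foldl_map]
  rfl

-- ===== VERDICT (by name: the statement is the Claim_ definition above) =====
theorem choose_columns_by_score_spec : Claim_equal_choose_columns_by_score := by
  intro score_list _
  unfold Spec_choose_columns_by_score
  have hinv : pvInv ((pvOccs score_list).foldl pvStepA PySem.Dict.empty)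
      ((pvOccs score_list).foldl pvStepB PySem.Dict.empty) :=
    pvInv_foldl _ _ _ ⟨rfl, by simp [PySem.Dict.keys, PySem.Dict.empty], by
      intro p hp; simp [PySem.Dict.empty] at hp⟩
  rw [pvA_eq_foldl, pvB_eq_foldl, hinv.1, List.map_map]
  apply List.map_congr_left
  intro q hq
  match hqe : q.2 with
  | [] => simp [pvBest, hqe]
  | e :: rest => simp [pvBest, hqe]
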